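-- pv_equiv track=rewrite | github.com/teraz1112/recursion | problem/validEmailList.py | validEmailList
-- ===== SOURCE A (Python) =====
-- def validEmailList(emailList):
--     def isValidEmail(email):
--         if email.find(' ') != -1:
--             return False
--         if email.find('@') == 0 or email.find('@') == -1:
--             return False
--         if email.find('@') != email.rfind('@'):
--             return False
--         # 「@」の後に「.」があること
--         if email.find('.', email.find('@')) == -1:
--             return False
--         return True
--     validEmailList = []
--     for email in emailList:
--         if isValidEmail(email):
--             validEmailList.append(email)
--     return validEmailList
-- ===== SOURCE B (Python) =====
-- def validEmailList(emailList):
--     def isValidEmail(email):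
--         # single left-to-right character scan instead of repeated substring searches
--         if email == "" or email[0] == '@':
--             return False
--         ats = 0
--         dot_after = False
--         for ch in email:
--             if ch == ' ':
--                 return False
--             if ch == '@':
--                 ats += 1
--             elif ch == '.' and ats > 0:
--                 dot_after = True
--         return ats == 1 and dot_after
--     return [email for email in emailList if isValidEmail(email)]
-- ===== Notes on version B (the rewrite author's own statement) =====
-- stated objective: alternative
-- what changed: The validity predicate is rewritten as one left-to-right character scan keeping an @-counter and a dot-after-@ flag, instead of four find/rfind/findFrom substring searches over the string; the filter becomes a comprehension.
import Mathlib
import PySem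

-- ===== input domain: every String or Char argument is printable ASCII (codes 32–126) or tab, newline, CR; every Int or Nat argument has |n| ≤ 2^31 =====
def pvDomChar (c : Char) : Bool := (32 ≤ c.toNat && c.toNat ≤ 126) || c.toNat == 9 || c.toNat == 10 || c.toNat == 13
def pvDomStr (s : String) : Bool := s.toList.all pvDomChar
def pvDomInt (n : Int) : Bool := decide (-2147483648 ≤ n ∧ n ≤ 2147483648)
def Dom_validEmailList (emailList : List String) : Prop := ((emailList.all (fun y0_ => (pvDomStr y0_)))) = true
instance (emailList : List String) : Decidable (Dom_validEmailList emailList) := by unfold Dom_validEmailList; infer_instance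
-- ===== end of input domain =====

-- B rewrites the validity predicate as one character scan (an @-counter and a
-- dot-after-@ flag) instead of A's find/rfind/findFrom substring searches; same results.
-- ===== PORT A =====
def isValidEmail_A (email : String) : Bool :=
  if PySem.Str.find email " " ≠ -1 then false
  else if PySem.Str.find email "@" = 0 ∨ PySem.Str.find email "@" = -1 then false
  else if PySem.Str.find email "@" ≠ PySem.Str.rfind email "@" then false
  else if PySem.Str.findFrom email "." (PySem.Str.find email "@") = -1 then false
  else true

def validEmailList (emailList : List String) : List String :=
  emailList.foldl (fun acc email => if isValidEmail_A email then acc ++ [email] else acc) []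

-- ===== PORT B =====
def okScan : List Char → Nat → Bool → Bool
  | [], ats, dot => ats == 1 && dot
  | c :: rest, ats, dot =>
    if c = ' ' then false
    else if c = '@' then okScan rest (ats + 1) dot
    else okScan rest ats (dot || (c == '.' && ats != 0))

def isValidEmail_B (email : String) : Bool :=
  if email = "" then false
  else if PySem.Str.pyGet? email 0 = some '@' then false
  else okScan email.toList 0 false

def validEmailList_alt (emailList : List String) : List String :=
  emailList.filter isValidEmail_B

-- ===== PRECONDITION & SPEC =====
def Spec_validEmailList (emailList : List String) (out : List String) : Prop := out = validEmailList_alt emailList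
instance (emailList : List String) (out : List String) : Decidable (Spec_validEmailList emailList out) := by unfold Spec_validEmailList; infer_instance

-- ===== CLAIM (what is proved, stated in full; the proofs are below) =====
def Claim_equal_validEmailList : Prop := ∀ (emailList : List String), Dom_validEmailList emailList → Spec_validEmailList emailList (validEmailList emailList)

-- ===== LEMMAS AND PROOFS =====

def GoodShape (l : List Char) : Prop :=
  ' ' ∉ l ∧ ∃ u v, l = u ++ '@' :: v ∧ u ≠ [] ∧ '@' ∉ u ∧ '@' ∉ v ∧ '.' ∈ v

lemma singleton_prefix_drop (c : Char) (l : List Char) (i : Nat) :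
    [c] <+: l.drop i ↔ l[i]? = some c := by
  constructor
  · rintro ⟨t, ht⟩
    have : (l.drop i)[0]? = some c := by rw [← ht]; rfl
    simpa [List.getElem?_drop] using this
  · intro h
    obtain ⟨hi, hc⟩ := List.getElem?_eq_some_iff.mp h
    refine ⟨l.drop (i+1), ?_⟩
    rw [List.drop_eq_getElem_cons hi, hc]
    rfl
lemma singleton_infix_iff (c : Char) (l : List Char) :
    [c] <:+: l ↔ c ∈ l := by
  constructor
  · intro h; exact (List.singleton_sublist.mp h.sublist)
  · intro h
    obtain ⟨u, v, rfl⟩ := List.append_of_mem h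
    exact ⟨u, v, by simp⟩
lemma rfind_go_ge (l : List Char) (c : Char) (j i : Nat)
    (hij : i ≤ j) (h : l[i]? = some c) :
    (i : Int) ≤ PySem.Chars.rfind.go l [c] j := by
  induction j with
  | zero =>
    have hi0 : i = 0 := by omega
    subst hi0
    have : [c] <+: l := by simpa using (singleton_prefix_drop c l 0).mpr h
    simp [PySem.Chars.rfind.go, List.isPrefixOf_iff_prefix.mpr this]
  | succ j ih =>
    rw [PySem.Chars.rfind.go]
    split
    · exact_mod_cast Int.ofNat_le.mpr (by omega)
    · rename_i hp
      rcases Nat.lt_or_ge i (j+1) with hlt | hge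
      · exact ih (by omega)
      · exfalso
        have : i = j + 1 := by omega
        subst this
        exact hp (List.isPrefixOf_iff_prefix.mpr ((singleton_prefix_drop c l (j+1)).mpr h))

lemma rfind_go_eq (l : List Char) (c : Char) (j k : Nat)
    (hk : l[k]? = some c) (hkj : k ≤ j)
    (hno : ∀ i, k < i → i ≤ j → l[i]? ≠ some c) :
    PySem.Chars.rfind.go l [c] j = k := by
  induction j with
  | zero =>
    have hk0 : k = 0 := by omega
    subst hk0
    have : [c] <+: l := by simpa using (singleton_prefix_drop c l 0).mpr hk
    simp [PySem.Chars.rfind.go, List.isPrefixOf_iff_prefix.mpr this]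
  | succ j ih =>
    rw [PySem.Chars.rfind.go]
    rcases Nat.lt_or_ge j (k) with hlt | hge
    · -- k = j+1
      have : k = j + 1 := by omega
      subst this
      simp [List.isPrefixOf_iff_prefix.mpr ((singleton_prefix_drop c l (j+1)).mpr hk)]
    · -- k ≤ j, so no occurrence at j+1
      have hpre : ¬ [c].isPrefixOf (l.drop (j+1)) = true := by
        intro hp
        exact hno (j+1) (by omega) (le_refl _)
          ((singleton_prefix_drop c l (j+1)).mp (List.isPrefixOf_iff_prefix.mp hp))
      simp only [hpre]
      exact ih hge (fun i h1 h2 => hno i h1 (by omega))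

lemma find_eq_of (l : List Char) (c : Char) (k : Nat)
    (hk : l[k]? = some c) (hno : ∀ i, i < k → l[i]? ≠ some c) :
    PySem.Chars.find l [c] = k := by
  have hmem : c ∈ l := List.mem_of_getElem? hk
  have hpos : 0 ≤ PySem.Chars.find l [c] :=
    (PySem.Chars.find_nonneg_iff l [c]).mpr ((singleton_infix_iff c l).mpr hmem)
  obtain ⟨hpre, hmin⟩ := PySem.Chars.find_spec hpos
  set f := (PySem.Chars.find l [c]).toNat with hf
  have hfc : l[f]? = some c := (singleton_prefix_drop c l f).mp hpre
  have : f = k := by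
    rcases Nat.lt_trichotomy f k with h | h | h
    · exact absurd hfc (hno f h)
    · exact h
    · exact absurd ((singleton_prefix_drop c l k).mpr hk) (hmin k h)
  omega
lemma cons_decomp (c : Char) (rest : List Char) (P : List Char → Prop) (hc : c ≠ '@') :
    (∃ u v, c :: rest = u ++ '@' :: v ∧ '@' ∉ u ∧ '@' ∉ v ∧ P v) ↔
    (∃ u v, rest = u ++ '@' :: v ∧ '@' ∉ u ∧ '@' ∉ v ∧ P v) := by
  constructor
  · rintro ⟨u, v, heq, hu, hv, hp⟩
    cases u with
    | nil => simp only [List.nil_append, List.cons.injEq] at heq; exact absurd heq.1 hc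
    | cons a u' =>
      simp only [List.cons_append, List.cons.injEq] at heq
      exact ⟨u', v, heq.2, fun h => hu (List.mem_cons_of_mem _ h), hv, hp⟩
  · rintro ⟨u, v, rfl, hu, hv, hp⟩
    exact ⟨c :: u, v, rfl, by simp [hu]; exact fun h => hc h.symm, hv, hp⟩

lemma at_cons_decomp (rest : List Char) (P : List Char → Prop) :
    (∃ u v, '@' :: rest = u ++ '@' :: v ∧ '@' ∉ u ∧ '@' ∉ v ∧ P v) ↔
    ('@' ∉ rest ∧ P rest) := by
  constructor
  · rintro ⟨u, v, heq, hu, hv, hp⟩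
    cases u with
    | nil =>
      simp only [List.nil_append, List.cons.injEq, true_and] at heq
      subst heq; exact ⟨hv, hp⟩
    | cons a u' =>
      simp only [List.cons_append, List.cons.injEq] at heq
      exact absurd (heq.1 ▸ List.mem_cons_self) hu
  · rintro ⟨hv, hp⟩
    exact ⟨[], rest, rfl, by simp, hv, hp⟩
lemma okScan_iff (l : List Char) (ats : Nat) (dot : Bool) :
    okScan l ats dot = true ↔
      ' ' ∉ l ∧
        ((ats = 1 ∧ '@' ∉ l ∧ (dot = true ∨ '.' ∈ l)) ∨
         (ats = 0 ∧ ∃ u v, l = u ++ '@' :: v ∧ '@' ∉ u ∧ '@' ∉ v ∧ (dot = true ∨ '.' ∈ v))) := by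
  induction l generalizing ats dot with
  | nil => simp [okScan]
  | cons c rest ih =>
    by_cases hsp : c = ' '
    · subst hsp; simp [okScan]
    by_cases hat : c = '@'
    · subst hat
      rw [show okScan ('@' :: rest) ats dot = okScan rest (ats + 1) dot from by simp [okScan], ih]
      rw [at_cons_decomp rest (fun v => dot = true ∨ '.' ∈ v)]
      simp only [List.mem_cons]
      constructor
      · rintro ⟨hs, h | h⟩
        · exact ⟨fun h' => hs (h'.resolve_left (by decide)), Or.inr ⟨by omega, h.2.1, h.2.2⟩⟩
        · exact absurd h.1 (by omega)
      · rintro ⟨hs, h | h⟩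
        · exact absurd (Or.inl trivial) h.2.1
        · exact ⟨fun h' => hs (Or.inr h'), Or.inl ⟨by omega, h.2.1, h.2.2⟩⟩
    · rw [show okScan (c :: rest) ats dot = okScan rest ats (dot || (c == '.' && ats != 0)) from by
        simp [okScan, hsp, hat], ih]
      rw [cons_decomp c rest (fun v => dot = true ∨ '.' ∈ v) hat]
      by_cases hats : ats = 0
      · subst hats
        simp only [bne_self_eq_false, Bool.and_false, Bool.or_false, List.mem_cons]
        constructor
        · rintro ⟨hs, h | h⟩
          · exact absurd h.1 (by omega)
          · exact ⟨fun h' => hs (h'.resolve_left (Ne.symm hsp)), Or.inr h⟩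
        · rintro ⟨hs, h | h⟩
          · exact absurd h.1 (by omega)
          · exact ⟨fun h' => hs (Or.inr h'), Or.inr h⟩
      · have hbne : (ats != 0) = true := by simpa using hats
        simp only [hbne, Bool.and_true, List.mem_cons, Bool.or_eq_true, beq_iff_eq]
        constructor
        · rintro ⟨hs, h | h⟩
          · exact ⟨fun h' => hs (h'.resolve_left (Ne.symm hsp)),
              Or.inl ⟨h.1, fun h' => h.2.1 (h'.resolve_left fun e => hat e.symm), by
                rcases h.2.2 with (hd | hd) | hd
                · exact Or.inl hd
                · exact Or.inr (Or.inl hd.symm)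
                · exact Or.inr (Or.inr hd)⟩⟩
          · exact absurd h.1 hats
        · rintro ⟨hs, h | h⟩
          · refine ⟨fun h' => hs (Or.inr h'), Or.inl ⟨h.1, fun h' => h.2.1 (Or.inr h'), ?_⟩⟩
            rcases h.2.2 with hd | hd | hd
            · exact Or.inl (Or.inl hd)
            · exact Or.inl (Or.inr hd.symm)
            · exact Or.inr hd
          · exact absurd h.1 hats
lemma isValidEmail_B_iff (s : String) :
    isValidEmail_B s = true ↔ GoodShape s.toList := by
  unfold isValidEmail_B GoodShape
  by_cases hnil : s = ""
  · subst hnil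
    simp
  · rw [if_neg hnil]
    have hget : PySem.Str.pyGet? s 0 = s.toList[0]? := by
      simpa using PySem.Str.pyGet?_natCast s (0 : Nat)
    by_cases hhd : PySem.Str.pyGet? s 0 = some '@'
    · rw [if_pos hhd]
      simp only [Bool.false_eq_true, false_iff]
      rintro ⟨-, u, v, heq, hu, hau, -, -⟩
      cases u with
      | nil => exact hu rfl
      | cons a u' =>
        rw [hget, heq] at hhd
        simp only [List.cons_append, List.getElem?_cons_zero, Option.some.injEq] at hhd
        exact hau (by simp [hhd])
    · rw [if_neg hhd, okScan_iff]
      constructor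
      · rintro ⟨hs, h | h⟩
        · exact absurd h.1 (by omega)
        · obtain ⟨-, u, v, heq, hau, hav, hd⟩ := h
          refine ⟨hs, u, v, heq, ?_, hau, hav, hd.resolve_left (by simp)⟩
          rintro rfl
          rw [hget, heq] at hhd
          simp at hhd
      · rintro ⟨hs, u, v, heq, hune, hau, hav, hd⟩
        exact ⟨hs, Or.inr ⟨rfl, u, v, heq, hau, hav, Or.inr hd⟩⟩
lemma isValidEmail_A_iff (s : String) :
    isValidEmail_A s = true ↔ GoodShape s.toList := by
  unfold isValidEmail_A GoodShape
  simp only [PySem.Str.find_eq, PySem.Str.rfind_eq, PySem.Str.findFrom_eq]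
  constructor
  · intro h
    split_ifs at h with c1 c2 c3 c4
    simp only [ne_eq, not_not, not_or] at c1 c2 c3
    have hsp : ' ' ∉ s.toList := by
      intro hm
      exact absurd ((PySem.Chars.find_ne_neg_one_iff s.toList [' ']).mpr
        ((singleton_infix_iff ' ' s.toList).mpr (by simpa using hm))) (by simpa using c1)
    have hf0 : 0 ≤ PySem.Chars.find s.toList (String.toList "@") := by
      have h1 := PySem.Chars.neg_one_le_find s.toList (String.toList "@")
      have h2 := c2.2
      omega
    obtain ⟨hpre, hmin⟩ := PySem.Chars.find_spec hf0
    set k := (PySem.Chars.find s.toList (String.toList "@")).toNat with hk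
    have hfk : PySem.Chars.find s.toList (String.toList "@") = (k : Int) :=
      (Int.toNat_of_nonneg hf0).symm
    have hkat : s.toList[k]? = some '@' :=
      (singleton_prefix_drop '@' s.toList k).mp (by simpa using hpre)
    obtain ⟨hklen, hkget⟩ := List.getElem?_eq_some_iff.mp hkat
    have hkne : k ≠ 0 := by
      intro h0; rw [h0] at hfk; exact c2.1 (by simpa using hfk)
    refine ⟨hsp, s.toList.take k, s.toList.drop (k+1), ?_, ?_, ?_, ?_, ?_⟩
    · conv_lhs => rw [← List.take_append_drop k s.toList,
        ← List.getElem_cons_drop hklen, hkget]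
    · rw [Ne, List.take_eq_nil_iff]
      rintro (h0 | h0)
      · exact hkne h0
      · rw [h0] at hklen; simp at hklen
    · intro hm
      obtain ⟨i, hi, hgi⟩ := List.mem_iff_getElem.mp hm
      have hik : i < k := lt_of_lt_of_le hi (by simp)
      rw [List.getElem_take] at hgi
      exact hmin i hik ((singleton_prefix_drop '@' s.toList i).mpr
        (List.getElem?_eq_some_iff.mpr ⟨by omega, hgi⟩)) |>.elim
    · intro hm
      obtain ⟨i, hi, hgi⟩ := List.mem_iff_getElem.mp hm
      have hlen2 : k + 1 + i < s.toList.length := by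
        rw [List.length_drop] at hi; omega
      have hgl : s.toList[k+1+i]? = some '@' := by
        rw [List.getElem_drop] at hgi
        exact List.getElem?_eq_some_iff.mpr ⟨hlen2, hgi⟩
      have hge := rfind_go_ge s.toList '@' s.toList.length (k+1+i) (by omega) hgl
      rw [PySem.Chars.rfind] at c3
      have hgo : PySem.Chars.rfind.go s.toList (String.toList "@") s.toList.length
          = (k : Int) := by rw [← c3, hfk]
      rw [show String.toList "@" = ['@'] from rfl] at hgo
      rw [hgo] at hge
      omega
    · have hne : PySem.Chars.findFrom s.toList (String.toList ".")
          ((k : Nat) : Int) none ≠ -1 := by rw [← hfk]; exact c4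
      have hinf : String.toList "." <:+: s.toList.drop k := by
        by_contra hno
        exact hne ((PySem.Chars.findFrom_natCast_eq_neg_one_iff s.toList _ k
          (le_of_lt hklen)).mpr hno)
      have hdot : '.' ∈ s.toList.drop k :=
        (singleton_infix_iff '.' (s.toList.drop k)).mp (by simpa using hinf)
      rw [← List.getElem_cons_drop hklen, hkget] at hdot
      rcases List.mem_cons.mp hdot with hbad | hgood
      · exact absurd hbad (by decide)
      · exact hgood
  · rintro ⟨hsp, u, v, heq, hune, hau, hav, hdv⟩
    have hkat : s.toList[u.length]? = some '@' := by rw [heq]; simp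
    have hklen : u.length < s.toList.length := (List.getElem?_eq_some_iff.mp hkat).1
    have hbefore : ∀ i, i < u.length → s.toList[i]? ≠ some '@' := by
      intro i hi hsome
      rw [heq, List.getElem?_append_left hi] at hsome
      exact hau (List.mem_of_getElem? hsome)
    have hfind : PySem.Chars.find s.toList (String.toList "@") = (u.length : Int) := by
      simpa using find_eq_of s.toList '@' u.length hkat hbefore
    have hafter : ∀ i, u.length < i → i ≤ s.toList.length → s.toList[i]? ≠ some '@' := by
      intro i hi hile hsome
      rcases Nat.lt_or_ge i s.toList.length with hlt | hge
      · rw [heq, List.getElem?_append_right (by omega), List.getElem?_cons,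
          if_neg (by omega)] at hsome
        exact hav (List.mem_of_getElem? hsome)
      · rw [List.getElem?_eq_none hge] at hsome; cases hsome
    have hrfind : PySem.Chars.rfind s.toList (String.toList "@") = (u.length : Int) := by
      rw [PySem.Chars.rfind]
      simpa using rfind_go_eq s.toList '@' s.toList.length u.length hkat (by omega) hafter
    have hdropk : s.toList.drop u.length = '@' :: v := by
      rw [heq]; exact List.drop_left
    have hc1 : ¬ PySem.Chars.find s.toList (String.toList " ") ≠ -1 := by
      simp only [ne_eq, not_not]
      rw [PySem.Chars.find_eq_neg_one_iff]
      intro hinf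
      exact hsp ((singleton_infix_iff ' ' s.toList).mp (by simpa using hinf))
    have hune' : u.length ≠ 0 := fun h0 => hune (List.length_eq_zero_iff.mp h0)
    have hc2 : ¬ (PySem.Chars.find s.toList (String.toList "@") = 0 ∨
        PySem.Chars.find s.toList (String.toList "@") = -1) := by
      rw [hfind]
      rintro (h0 | h0) <;> omega
    have hc3 : ¬ PySem.Chars.find s.toList (String.toList "@") ≠
        PySem.Chars.rfind s.toList (String.toList "@") := by
      rw [hfind, hrfind]; simp
    have hc4 : ¬ PySem.Chars.findFrom s.toList (String.toList ".")
        (PySem.Chars.find s.toList (String.toList "@")) none = -1 := by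
      rw [hfind]
      intro hbad
      rw [show (u.length : Int) = ((u.length : Nat) : Int) from rfl] at hbad
      rw [PySem.Chars.findFrom_natCast_eq_neg_one_iff s.toList _ u.length
        (le_of_lt hklen)] at hbad
      exact hbad (by
        rw [hdropk]
        exact (singleton_infix_iff '.' ('@' :: v)).mpr (List.mem_cons_of_mem _ hdv))
    rw [if_neg hc1, if_neg hc2, if_neg hc3, if_neg hc4]

lemma pred_eq (s : String) : isValidEmail_A s = isValidEmail_B s := by
  rcases hb : isValidEmail_B s with _ | _
  · rcases ha : isValidEmail_A s with _ | _
    · rfl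
    · exact absurd ((isValidEmail_B_iff s).mpr ((isValidEmail_A_iff s).mp ha)) (by simp [hb])
  · exact (isValidEmail_A_iff s).mpr ((isValidEmail_B_iff s).mp hb)

-- ===== VERDICT (by name: the statement is the Claim_ definition above) =====
theorem validEmailList_spec : Claim_equal_validEmailList := by
  intro emailList _
  unfold Spec_validEmailList validEmailList validEmailList_alt
  have := PySem.List.foldl_append_if isValidEmail_A id emailList []
  simp only [id] at this
  rw [this, List.nil_append, List.map_id]
  congr 1
  funext s
  rw [pred_eq]
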